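-- pv_equiv track=rewrite | github.com/Ritesh7767/dataStructure | twoPointer.py | reverseMatrix
-- ===== SOURCE A (Python) =====
-- def reverseMatrix(matrix):
--
--     for row in matrix:
--
--         left = 0
--         right = len(row) - 1
--
--         while left < right:
--
--             row[left], row[right] = row[right], row[left]
--             left += 1
--             right -= 1
--
--         for i in range(len(row)):
--             if row[i] == 0:
--                 row[i] = 1
--             else:
--                 row[i] = 0
--
--     return matrix
-- ===== SOURCE B (Python) =====
-- def reverseMatrix(matrix):
--     for row in matrix:
--         row[:] = [1 if x == 0 else 0 for x in reversed(row)]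
--     return matrix
-- ===== Notes on version B (the rewrite author's own statement) =====
-- stated objective: simpler
-- what changed: Each row's two sequential passes (two-pointer in-place reversal, then an index loop flipping each entry) are replaced by a single comprehension over the reversed row that flips while reversing, written back via slice assignment.
import Mathlib
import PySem

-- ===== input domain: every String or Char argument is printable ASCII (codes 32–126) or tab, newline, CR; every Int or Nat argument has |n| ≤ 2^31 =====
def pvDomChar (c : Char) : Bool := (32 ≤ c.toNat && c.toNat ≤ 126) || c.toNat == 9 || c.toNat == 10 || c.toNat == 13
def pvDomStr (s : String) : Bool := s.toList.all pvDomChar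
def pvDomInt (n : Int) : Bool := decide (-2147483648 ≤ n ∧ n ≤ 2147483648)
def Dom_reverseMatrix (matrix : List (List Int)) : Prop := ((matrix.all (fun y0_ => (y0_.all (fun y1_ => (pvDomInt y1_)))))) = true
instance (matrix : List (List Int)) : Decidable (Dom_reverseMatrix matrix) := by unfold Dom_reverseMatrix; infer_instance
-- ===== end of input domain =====

-- B folds A's two per-row passes (two-pointer reversal + flip loop) into one comprehension over the
-- reversed row (objective: simpler). Both Pythons mutate the row lists in place and return the same
-- `matrix` object; the equivalence proved here is about the returned value.

-- ===== PORT A =====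
-- the `while left < right` two-pointer swap loop (indices in range, so getD is exact here)
def pvSwapLoop (row : List Int) (left right : Nat) : List Int :=
  if left < right then
    pvSwapLoop ((row.set left (row.getD right 0)).set right (row.getD left 0)) (left + 1) (right - 1)
  else row
termination_by right - left

-- the `for i in range(len(row))` flip loop
def pvFlipLoop (row : List Int) : List Int :=
  (List.range row.length).foldl
    (fun r i => if r.getD i 0 = 0 then r.set i 1 else r.set i 0) row

def reverseMatrix (matrix : List (List Int)) : List (List Int) :=
  matrix.map (fun row => pvFlipLoop (pvSwapLoop row 0 (row.length - 1)))

-- ===== PORT B =====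
def reverseMatrix_alt (matrix : List (List Int)) : List (List Int) :=
  matrix.map (fun row => row.reverse.map (fun x => if x = 0 then 1 else 0))

-- ===== PRECONDITION & SPEC =====
def Spec_reverseMatrix (matrix : List (List Int)) (out : List (List Int)) : Prop := out = reverseMatrix_alt matrix
instance (matrix : List (List Int)) (out : List (List Int)) : Decidable (Spec_reverseMatrix matrix out) := by unfold Spec_reverseMatrix; infer_instance

-- ===== CLAIM (what is proved, stated in full; the proofs are below) =====
def Claim_equal_reverseMatrix : Prop := ∀ (matrix : List (List Int)), Dom_reverseMatrix matrix → Spec_reverseMatrix matrix (reverseMatrix matrix)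

-- ===== LEMMAS AND PROOFS =====

theorem pvSwapLoop_length (row : List Int) (l r : Nat) :
    (pvSwapLoop row l r).length = row.length := by
  fun_induction pvSwapLoop with
  | case1 row l r h ih => simpa using ih
  | case2 => rfl

-- element characterisation of the swap loop: inside [l, r] it mirrors, outside it is untouched
theorem pvSwapLoop_getD (row : List Int) (l r : Nat) (hr : r < row.length) (i : Nat) :
    (pvSwapLoop row l r).getD i 0 =
      if l ≤ i ∧ i ≤ r then row.getD (l + r - i) 0 else row.getD i 0 := by
  fun_induction pvSwapLoop with
  | case1 row l r h ih =>
    have hl : l < row.length := lt_of_lt_of_le h (le_of_lt hr)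
    have ih' := ih (by simp only [List.length_set]; omega)
    rw [ih']
    have hgd : ∀ j, j < row.length →
        ((row.set l (row.getD r 0)).set r (row.getD l 0)).getD j 0 =
          if j = r then row.getD l 0 else if j = l then row.getD r 0 else row.getD j 0 := by
      intro j hj
      simp only [List.getD, List.getElem?_set, List.length_set]
      by_cases hjr : j = r
      · subst hjr; simp [hj]
      · have h1 : ¬ (r = j) := fun hh => hjr hh.symm
        simp only [h1, if_false]
        by_cases hjl : j = l
        · subst hjl; simp [hj, hjr]
        · have h2 : ¬ (l = j) := fun hh => hjl hh.symm
          simp [h2, hjr, hjl]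
    by_cases hin : l ≤ i ∧ i ≤ r
    · obtain ⟨hli, hir0⟩ := hin
      by_cases hin' : l + 1 ≤ i ∧ i ≤ r - 1
      · rw [if_pos hin', if_pos ⟨hli, hir0⟩]
        have hm : l + 1 + (r - 1) - i = l + r - i := by omega
        rw [hm, hgd _ (by omega)]
        have hne1 : ¬ (l + r - i = r) := by omega
        have hne2 : ¬ (l + r - i = l) := by omega
        rw [if_neg hne1, if_neg hne2]
      · rw [if_neg hin', if_pos ⟨hli, hir0⟩, hgd _ (by omega)]
        by_cases hir : i = r
        · have e : l + r - i = l := by omega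
          rw [e, if_pos hir]
        · have hil : i = l := by omega
          have e : l + r - i = r := by omega
          rw [e, if_neg hir, if_pos hil]
    · have hin2 : ¬ (l + 1 ≤ i ∧ i ≤ r - 1) := by omega
      rw [if_neg hin, if_neg hin2]
      by_cases hi : i < row.length
      · rw [hgd _ hi]
        have hne1 : ¬ (i = r) := by omega
        have hne2 : ¬ (i = l) := by omega
        rw [if_neg hne1, if_neg hne2]
      · have hge : row.length ≤ i := by omega
        rw [List.getD_eq_default _ _ (by simp only [List.length_set]; omega),
            List.getD_eq_default _ _ hge]
  | case2 row l r h =>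
    by_cases hin : l ≤ i ∧ i ≤ r
    · have e : l + r - i = i := by omega
      rw [if_pos hin, e]
    · rw [if_neg hin]

theorem pvSwapLoop_reverse (row : List Int) :
    pvSwapLoop row 0 (row.length - 1) = row.reverse := by
  rcases eq_or_ne row [] with hnil | hnil
  · subst hnil; simp [pvSwapLoop]
  · have hpos : 0 < row.length := List.length_pos_of_ne_nil hnil
    apply List.ext_getElem
    · simp [pvSwapLoop_length]
    · intro i h1 h2
      have hi : i < row.length := by simpa [pvSwapLoop_length] using h1
      have hr : row.length - 1 < row.length := by omega
      have hkey := pvSwapLoop_getD row 0 (row.length - 1) hr i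
      rw [if_pos ⟨Nat.zero_le i, by omega⟩] at hkey
      calc (pvSwapLoop row 0 (row.length - 1))[i]'h1
          = (pvSwapLoop row 0 (row.length - 1)).getD i 0 := (List.getD_eq_getElem _ _ h1).symm
        _ = row.getD (0 + (row.length - 1) - i) 0 := hkey
        _ = row[row.length - 1 - i]'(by omega) := by
              have e : 0 + (row.length - 1) - i = row.length - 1 - i := by omega
              rw [e, List.getD_eq_getElem]
        _ = row.reverse[i]'h2 := by rw [List.getElem_reverse]

-- the flip loop equals mapping the flip function
theorem pvFlipLoop_aux (row : List Int) (n : Nat) (hn : n ≤ row.length) :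
    (List.range n).foldl (fun r i => if r.getD i 0 = 0 then r.set i 1 else r.set i 0) row =
      (row.take n).map (fun x => if x = 0 then 1 else 0) ++ row.drop n := by
  induction n with
  | zero => simp
  | succ m ih =>
    rw [List.range_succ, List.foldl_append, ih (by omega)]
    have hm : m < row.length := by omega
    have hprelen : ((row.take m).map (fun x : Int => if x = 0 then (1 : Int) else 0)).length = m := by
      simp; omega
    have hgd : (((row.take m).map (fun x : Int => if x = 0 then (1 : Int) else 0)) ++ row.drop m).getD m 0
        = row[m]'hm := by
      rw [List.getD_append_right _ _ _ _ (by omega), hprelen, Nat.sub_self]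
      simp [List.getD, List.getElem?_drop, List.getElem?_eq_getElem hm]
    have hdropcons : row.drop m = (row[m]'hm) :: row.drop (m + 1) := List.drop_eq_getElem_cons hm
    have hset : ∀ v : Int,
        (((row.take m).map (fun x : Int => if x = 0 then (1 : Int) else 0)) ++ row.drop m).set m v =
          ((row.take m).map (fun x : Int => if x = 0 then (1 : Int) else 0)) ++ v :: row.drop (m + 1) := by
      intro v
      rw [List.set_append_right _ _ (by omega), hprelen, Nat.sub_self]
      rw [hdropcons]
      rfl
    have htake : row.take (m + 1) = row.take m ++ [row[m]'hm] := by
      rw [List.take_add_one]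
      simp [List.getElem?_eq_getElem hm]
    simp only [List.foldl_cons, List.foldl_nil, hgd, htake, List.map_append]
    by_cases hz : row[m]'hm = 0
    · rw [if_pos hz, hset, hz]
      simp
    · rw [if_neg hz, hset]
      simp [hz]

theorem pvFlipLoop_map (row : List Int) :
    pvFlipLoop row = row.map (fun x => if x = 0 then 1 else 0) := by
  unfold pvFlipLoop
  rw [pvFlipLoop_aux row row.length le_rfl]
  simp

-- ===== VERDICT (by name: the statement is the Claim_ definition above) =====
theorem reverseMatrix_spec : Claim_equal_reverseMatrix := by
  intro matrix _
  unfold Spec_reverseMatrix reverseMatrix reverseMatrix_alt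
  apply List.map_congr_left
  intro row _
  rw [pvSwapLoop_reverse, pvFlipLoop_map]
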